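-- pv_equiv track=rewrite | github.com/mariask2/PAL-A-tool-for-Pre-annotation-and-Active-Learning | simple_tokenizer.py | simple_tokenize_list
-- ===== SOURCE A (Python) =====
-- def remove_spaces(line):
--     """
--     Removes double spaces
--     """
--     line = line.lstrip()
--     result = ""
--     for i, ch in enumerate(line):
--         if i+1 == len(line):
--             result = result + ch
--         elif (ch == " " and (line[i+1] == " " or line[i+1] == "\n")):
--             pass
--         else:
--             result = result + ch
--
--     return result
--
-- def simple_tokenize_list(lines):
--     """
--     Tokenizes each string in a list of strings, and replaces
--     tab with space, and double space with space.
--     param: A list of strings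
--     :returns A list that contains a list of tokens in the input string
--     """
--     output = []
--     for line in lines:
--         if line.strip() != "":
--             line = line.strip()
--             line = line.replace("\t", " ")
--             for ch in ['.', ',', '!', '?', '%', ":", ";", '"', "'", "-", "/", "(", ")"]:
--                 line = line.replace(ch, " " + ch + " ")
--             line = line.strip()
--             removed_space = remove_spaces(line)
--             output.append(removed_space.split(" "))
--     return output
-- ===== SOURCE B (Python) =====
-- PUNCT = set('.,!?%:;"\'/()-')
--
--
-- def _pad(c):
--     if c in PUNCT:
--         return " " + c + " "
--     if c == "\t":
--         return " "
--     return c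
--
--
-- def simple_tokenize_list(lines):
--     """
--     Tokenizes each string in a list of strings, and replaces
--     tab with space, and double space with space.
--     """
--     output = []
--     for line in lines:
--         if line.strip() != "":
--             padded = "".join(_pad(c) for c in line).strip()
--             # keep a space only when the following character is neither a
--             # space nor a newline; the final character is always kept
--             kept = "".join(c for c, nxt in zip(padded, padded[1:])
--                            if c != " " or nxt not in " \n")
--             output.append((kept + padded[-1:]).split(" "))
--     return output
-- ===== Notes on version B (the rewrite author's own statement) =====
-- stated objective: alternative
-- what changed: A pads punctuation with 14 sequential whole-string .replace passes and removes doubled spaces with an index-driven enumerate loop that re-indexes the string; B pads every character in one pass and filters spaces with a single pairwise zip(s, s[1:]) scan, keeping a space only when the next character is neither a space nor a newline.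
import Mathlib
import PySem

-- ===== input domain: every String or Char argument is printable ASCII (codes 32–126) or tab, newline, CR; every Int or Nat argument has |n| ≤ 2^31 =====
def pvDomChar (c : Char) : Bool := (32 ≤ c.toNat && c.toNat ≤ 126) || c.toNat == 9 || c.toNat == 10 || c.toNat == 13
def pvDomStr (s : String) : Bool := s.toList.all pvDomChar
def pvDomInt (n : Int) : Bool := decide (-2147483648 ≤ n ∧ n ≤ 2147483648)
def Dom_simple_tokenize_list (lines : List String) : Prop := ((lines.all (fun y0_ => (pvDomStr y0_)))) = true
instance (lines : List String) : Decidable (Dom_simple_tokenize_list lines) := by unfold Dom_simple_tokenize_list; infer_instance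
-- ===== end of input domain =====

-- B replaces A's 14 sequential `.replace` passes and index-driven double-space
-- loop by one single-pass padding map plus one pairwise zip filter over the
-- padded string (objective: alternative; same return value, no side effects).

-- ===== PORT A =====
def pvPunct : List Char := ['.', ',', '!', '?', '%', ':', ';', '"', '\'', '-', '/', '(', ')']

-- remove_spaces: lstrip, then the enumerate loop with its three branches
def pvRemoveSpacesA (line : List Char) : List Char :=
  let l := PySem.Chars.lstrip line
  (PySem.List.enumerate l).foldl (fun result ic =>
    if ic.1 + 1 == PySem.Chars.len l then result ++ [ic.2]
    else if ic.2 == ' ' &&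
        (PySem.List.pyGet? l (ic.1 + 1) == some ' ' || PySem.List.pyGet? l (ic.1 + 1) == some '\n') then
      result
    else result ++ [ic.2]) []

def simple_tokenize_list (lines : List String) : List (List String) :=
  lines.foldl (fun output line =>
    if PySem.Str.strip line ≠ "" then
      let l1 := PySem.Chars.strip line.toList
      let l2 := PySem.Chars.replace l1 ['\t'] [' ']
      let l3 := pvPunct.foldl (fun l c => PySem.Chars.replace l [c] [' ', c, ' ']) l2
      let l4 := PySem.Chars.strip l3
      output ++ [(PySem.Chars.splitOn (pvRemoveSpacesA l4) [' ']).map String.ofList]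
    else output) []

-- ===== PORT B =====
def pvPunctSet : PySem.Set Char := PySem.Set.ofList ['.', ',', '!', '?', '%', ':', ';', '"', '\'', '/', '(', ')', '-']

def pvPad (c : Char) : List Char :=
  if pvPunctSet.contains c then [' ', c, ' ']
  else if c == '\t' then [' ']
  else [c]

-- the pairwise comprehension over zip(padded, padded[1:])
def pvKept (padded : List Char) : List Char :=
  ((padded.zip (PySem.List.slice padded (some 1) none)).filter fun p =>
    p.1 != ' ' || !(p.2 == ' ' || p.2 == '\n')).map Prod.fst

def simple_tokenize_list_alt (lines : List String) : List (List String) :=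
  lines.foldl (fun output line =>
    if PySem.Str.strip line ≠ "" then
      let padded := PySem.Chars.strip (line.toList.flatMap pvPad)
      output ++ [(PySem.Chars.splitOn
        (pvKept padded ++ PySem.List.slice padded (some (-1)) none) [' ']).map String.ofList]
    else output) []

-- ===== PRECONDITION & SPEC =====
def Spec_simple_tokenize_list (lines : List String) (out : List (List String)) : Prop := out = simple_tokenize_list_alt lines
instance (lines : List String) (out : List (List String)) : Decidable (Spec_simple_tokenize_list lines out) := by unfold Spec_simple_tokenize_list; infer_instance

-- ===== CLAIM (what is proved, stated in full; the proofs are below) =====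
def Claim_equal_simple_tokenize_list : Prop := ∀ (lines : List String), Dom_simple_tokenize_list lines → Spec_simple_tokenize_list lines (simple_tokenize_list lines)

-- ===== LEMMAS AND PROOFS =====

-- proof-side helpers ---------------------------------------------------------

-- single-char padding that the chain of replaces amounts to
def pvTabf (c : Char) : List Char := if c = '\t' then [' '] else [c]

def pvRepF (cs : List Char) (c : Char) : List Char := if cs.contains c then [' ', c, ' '] else [c]

-- structural version of remove_spaces' loop / of B's pairwise filter
def pvCollapse : List Char → List Char
  | [] => []
  | [x] => [x]
  | x :: y :: r => if x = ' ' ∧ (y = ' ' ∨ y = '\n') then pvCollapse (y :: r) else x :: pvCollapse (y :: r)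

-- 1. single-character replace is a flatMap ------------------------------------

theorem pv_replace_go_single (c : Char) (new : List Char) :
    ∀ (l acc : List Char), PySem.Chars.replace.go [c] new l.length l acc
      = acc.reverse ++ l.flatMap (fun x => if x = c then new else [x]) := by
  intro l
  induction l with
  | nil => intro acc; simp only [List.length_nil]; rw [PySem.Chars.replace.go.eq_1]; simp
  | cons x t ih =>
    intro acc
    rw [show (x :: t).length = t.length.succ from rfl, PySem.Chars.replace.go.eq_3]
    by_cases hx : x = c
    · subst hx
      rw [if_pos (by simp [List.isPrefixOf])]
      simp only [List.length_cons, List.drop_succ_cons, List.length_nil, List.drop_zero]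
      rw [ih (new.reverse ++ acc)]
      simp
    · rw [if_neg (by simp [List.isPrefixOf, Ne.symm hx])]
      rw [ih (x :: acc)]
      simp [hx]

theorem pv_replace_single (l : List Char) (c : Char) (new : List Char) :
    PySem.Chars.replace l [c] new = l.flatMap (fun x => if x = c then new else [x]) := by
  rw [PySem.Chars.replace]
  rw [if_neg (by simp)]
  exact pv_replace_go_single c new l []

-- 2. the chain of punctuation replaces is one flatMap -------------------------

theorem pv_foldl_replace :
    ∀ (cs : List Char), cs.Nodup → (' ' ∈ cs → False) → ∀ (s : List Char),
      cs.foldl (fun l c => PySem.Chars.replace l [c] [' ', c, ' ']) s = s.flatMap (pvRepF cs) := by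
  intro cs
  induction cs with
  | nil =>
    intro _ _ s
    simp only [List.foldl_nil]
    induction s with
    | nil => simp
    | cons a s ihs => simp [pvRepF, ← ihs]
  | cons c cs ih =>
    intro hnd hsp s
    have hc : ¬ c ∈ cs := (List.nodup_cons.mp hnd).1
    have hs : ¬ ' ' ∈ cs := fun h => hsp (List.mem_cons_of_mem _ h)
    have hcs : ¬ c = ' ' := fun h => hsp (h ▸ List.mem_cons_self ..)
    simp only [List.foldl_cons]
    rw [ih (List.Nodup.of_cons hnd) (fun h => hsp (List.mem_cons_of_mem _ h)),
      pv_replace_single, List.flatMap_assoc]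
    refine List.flatMap_congr (fun x _ => ?_)
    by_cases hx : x = c
    · subst hx
      simp [pvRepF, List.contains_eq_mem, hc, hs]
    · simp [pvRepF, List.contains_eq_mem, hx]

-- 3. composed padding is pvPad ------------------------------------------------

theorem pv_contains_eq (x : Char) : pvPunctSet.contains x = pvPunct.contains x := by
  by_cases h : x ∈ pvPunct
  · fin_cases h <;> decide
  · have h1 : pvPunct.contains x = false := by
      simp [List.contains_eq_mem, h]
    have h2 : pvPunctSet.contains x = false := by
      simp only [PySem.Set.contains, List.contains_eq_mem, decide_eq_false_iff_not]
      intro hm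
      exact h (by revert hm; show x ∈ PySem.Set.ofList _ → _; rw [PySem.Set.mem_ofList]; intro hm; fin_cases hm <;> decide)
    rw [h1, h2]

theorem pv_pad_eq (x : Char) : (pvTabf x).flatMap (pvRepF pvPunct) = pvPad x := by
  by_cases ht : x = '\t'
  · subst ht; decide
  · by_cases hp : x ∈ pvPunct
    · fin_cases hp <;> decide
    · have h1 : pvPunct.contains x = false := by simp [List.contains_eq_mem, hp]
      have h2 : pvPunctSet.contains x = false := by rw [pv_contains_eq, h1]
      have h3 : ¬ x ∈ pvPunctSet := by
        simpa [PySem.Set.contains, List.contains_eq_mem] using h2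
      simp [pvTabf, ht, pvRepF, pvPad, hp, h3]

-- 4. strip sandwich -----------------------------------------------------------

theorem pv_pad_space (c : Char) (h : PySem.Chars.isspace c = true) :
    (pvPad c).all PySem.Chars.isspace := by
  have hnp : ¬ c ∈ pvPunctSet := by
    intro hm
    have hm2 : c ∈ ['.', ',', '!', '?', '%', ':', ';', '"', '\'', '/', '(', ')', '-'] :=
      (PySem.Set.mem_ofList _ c).mp hm
    fin_cases hm2 <;> exact absurd h (by decide)
  by_cases ht : c = '\t'
  · subst ht; decide
  · simp [pvPad, PySem.Set.contains, List.contains_eq_mem, hnp, ht, h]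

theorem pv_all_space_pad (a : List Char) (h : a.all PySem.Chars.isspace)
    : (a.flatMap pvPad).all PySem.Chars.isspace := by
  induction a with
  | nil => simp
  | cons c a ih =>
    simp only [List.all_cons, Bool.and_eq_true] at h
    simp only [List.flatMap_cons, List.all_append, Bool.and_eq_true]
    exact ⟨pv_pad_space c h.1, ih h.2⟩

theorem pv_lstrip_append (a s : List Char) (ha : a.all PySem.Chars.isspace) :
    PySem.Chars.lstrip (a ++ s) = PySem.Chars.lstrip s := by
  rw [PySem.Chars.lstrip, PySem.Chars.lstrip, List.dropWhile_append,
    if_pos (by simp [List.dropWhile_eq_nil_iff]; intro x hx; exact (List.all_eq_true.mp ha) x hx)]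

theorem pv_rstrip_append (s b : List Char) (hb : b.all PySem.Chars.isspace) :
    PySem.Chars.rstrip (s ++ b) = PySem.Chars.rstrip s := by
  rw [PySem.Chars.rstrip, PySem.Chars.rstrip, List.reverse_append, List.dropWhile_append,
    if_pos (by simp [List.dropWhile_eq_nil_iff]; intro x hx; exact (List.all_eq_true.mp hb) x hx)]

theorem pv_rstrip_all_space (b : List Char) (hb : b.all PySem.Chars.isspace) :
    PySem.Chars.rstrip b = [] := by
  rw [PySem.Chars.rstrip, List.dropWhile_eq_nil_iff.mpr, List.reverse_nil]
  intro x hx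
  exact (List.all_eq_true.mp hb) x (List.mem_reverse.mp hx)

theorem pv_lstrip_all_space (b : List Char) (hb : b.all PySem.Chars.isspace) :
    PySem.Chars.lstrip b = [] := by
  rw [PySem.Chars.lstrip, List.dropWhile_eq_nil_iff.mpr]
  intro x hx
  exact (List.all_eq_true.mp hb) x hx

theorem pv_lstrip_sublist_space (b : List Char) (hb : b.all PySem.Chars.isspace) :
    (PySem.Chars.lstrip b).all PySem.Chars.isspace := by
  rw [pv_lstrip_all_space b hb]; rfl

theorem pv_strip_sandwich (a s b : List Char) (ha : a.all PySem.Chars.isspace)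
    (hb : b.all PySem.Chars.isspace) :
    PySem.Chars.strip (a ++ s ++ b) = PySem.Chars.strip s := by
  rw [PySem.Chars.strip, PySem.Chars.strip, List.append_assoc, pv_lstrip_append a (s ++ b) ha]
  rw [PySem.Chars.lstrip, List.dropWhile_append]
  by_cases hs : (List.dropWhile PySem.Chars.isspace s).isEmpty
  · rw [if_pos hs]
    have hse : PySem.Chars.lstrip s = [] := by
      simpa [PySem.Chars.lstrip, List.isEmpty_iff] using hs
    rw [hse]
    show PySem.Chars.rstrip (PySem.Chars.lstrip b) = PySem.Chars.rstrip []
    rw [pv_rstrip_all_space _ (pv_lstrip_sublist_space b hb), PySem.Chars.rstrip]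
    simp
  · rw [if_neg hs]
    exact pv_rstrip_append _ b hb

theorem pv_strip_decomp (l : List Char) :
    ∃ a b, l = a ++ PySem.Chars.strip l ++ b ∧ a.all PySem.Chars.isspace ∧ b.all PySem.Chars.isspace := by
  refine ⟨List.takeWhile PySem.Chars.isspace l,
    (List.takeWhile PySem.Chars.isspace (PySem.Chars.lstrip l).reverse).reverse, ?_, ?_, ?_⟩
  · conv_lhs => rw [← List.takeWhile_append_dropWhile (p := PySem.Chars.isspace) (l := l)]
    rw [List.append_assoc]
    congr 1
    show PySem.Chars.lstrip l = _
    rw [PySem.Chars.strip, PySem.Chars.rstrip]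
    conv_lhs => rw [← List.reverse_reverse (PySem.Chars.lstrip l),
      ← List.takeWhile_append_dropWhile (p := PySem.Chars.isspace) (l := (PySem.Chars.lstrip l).reverse)]
    rw [List.reverse_append]
  · exact List.all_eq_true.mpr (fun x hx => List.mem_takeWhile_imp hx)
  · exact List.all_eq_true.mpr (fun x hx => List.mem_takeWhile_imp (List.mem_reverse.mp hx))

theorem pv_strip_pad_strip (l : List Char) :
    PySem.Chars.strip ((PySem.Chars.strip l).flatMap pvPad) = PySem.Chars.strip (l.flatMap pvPad) := by
  obtain ⟨a, b, hl, ha, hb⟩ := pv_strip_decomp l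
  conv_rhs => rw [hl]
  rw [List.flatMap_append, List.flatMap_append,
    pv_strip_sandwich _ _ _ (pv_all_space_pad a ha) (pv_all_space_pad b hb)]

theorem pv_rstrip_prefix (t : List Char) : ∃ w, t = PySem.Chars.rstrip t ++ w := by
  refine ⟨(List.takeWhile PySem.Chars.isspace t.reverse).reverse, ?_⟩
  rw [PySem.Chars.rstrip]
  conv_lhs => rw [← List.reverse_reverse t,
    ← List.takeWhile_append_dropWhile (p := PySem.Chars.isspace) (l := t.reverse)]
  rw [List.reverse_append]

theorem pv_lstrip_strip (s : List Char) : PySem.Chars.lstrip (PySem.Chars.strip s) = PySem.Chars.strip s := by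
  rw [PySem.Chars.strip]
  obtain ⟨w, hw⟩ := pv_rstrip_prefix (PySem.Chars.lstrip s)
  cases hr : PySem.Chars.rstrip (PySem.Chars.lstrip s) with
  | nil => simp [PySem.Chars.lstrip]
  | cons x xs =>
    have hts : List.dropWhile PySem.Chars.isspace (PySem.Chars.lstrip s) = PySem.Chars.lstrip s := by
      rw [PySem.Chars.lstrip]
      exact List.dropWhile_idempotent _ _
    rw [hr] at hw
    have hx : PySem.Chars.isspace x = false := by
      by_contra hxp
      have hxp' : PySem.Chars.isspace x = true := by
        cases hv : PySem.Chars.isspace x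
        · exact absurd hv hxp
        · rfl
      rw [hw, List.cons_append, List.dropWhile_cons, if_pos hxp'] at hts
      have h1 := congrArg List.length hts
      have h2 := List.length_dropWhile_le PySem.Chars.isspace (xs ++ w)
      simp [List.length_append] at h1 h2 ⊢
      omega
    rw [PySem.Chars.lstrip, List.dropWhile_cons, if_neg (by simp [hx])]

-- 5. remove_spaces' loop is pvCollapse ---------------------------------------

theorem pv_loopA :
    ∀ (l pre : List Char) (acc : List Char),
      (PySem.List.enumerate l (pre.length : Int)).foldl (fun result ic =>
        if ic.1 + 1 == PySem.Chars.len (pre ++ l) then result ++ [ic.2]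
        else if ic.2 == ' ' &&
            (PySem.List.pyGet? (pre ++ l) (ic.1 + 1) == some ' ' ||
              PySem.List.pyGet? (pre ++ l) (ic.1 + 1) == some '\n') then
          result
        else result ++ [ic.2]) acc = acc ++ pvCollapse l := by
  intro l
  induction l with
  | nil =>
    intro pre acc
    rw [PySem.List.enumerate_nil, List.foldl_nil]
    simp [pvCollapse]
  | cons x t ih =>
    intro pre acc
    rw [PySem.List.enumerate_cons, List.foldl_cons]
    cases t with
    | nil =>
      have hc1 : ((pre.length : Int) + 1 == PySem.Chars.len (pre ++ [x])) = true := by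
        simp [PySem.Chars.len_eq]
      rw [PySem.List.enumerate_nil, List.foldl_nil]
      simp only [hc1, if_true]
      simp [pvCollapse]
    | cons y t' =>
      have hc1 : ((pre.length : Int) + 1 == PySem.Chars.len (pre ++ x :: y :: t')) = false := by
        simp only [PySem.Chars.len_eq, List.length_append, List.length_cons, beq_eq_false_iff_ne,
          ne_eq]
        push_cast
        omega
      have hy : PySem.List.pyGet? (pre ++ x :: y :: t') ((pre.length : Int) + 1) = some y := by
        rw [show (pre.length : Int) + 1 = ((pre.length + 1 : Nat) : Int) by push_cast; ring,
          PySem.List.pyGet?_natCast]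
        rw [List.getElem?_append_right (by omega)]
        simp
      simp only [hc1, Bool.false_eq_true, if_false, hy]
      have hrw1 : pre ++ x :: y :: t' = (pre ++ [x]) ++ y :: t' := by simp
      have hrw2 : (pre.length : Int) + 1 = ((pre ++ [x]).length : Int) := by simp
      by_cases hb : x = ' ' ∧ (y = ' ' ∨ y = '\n')
      · have hc2 : (x == ' ' && (some y == some ' ' || some y == some '\n')) = true := by
          obtain ⟨h1, h2⟩ := hb
          subst h1
          rcases h2 with h2 | h2 <;> subst h2 <;> decide
        simp only [hc2, if_true]
        rw [hrw2]
        conv_lhs => rw [hrw1]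
        rw [ih (pre ++ [x]) acc]
        rw [pvCollapse, if_pos hb]
      · have hc2 : (x == ' ' && (some y == some ' ' || some y == some '\n')) = false := by
          cases hx : x == ' '
          · simp
          · have hx' : x = ' ' := by simpa using hx
            simp only [Bool.true_and]
            have h2 : ¬ (y = ' ' ∨ y = '\n') := fun h => hb ⟨hx', h⟩
            simp [not_or] at h2
            simp [h2.1, h2.2]
        simp only [hc2, Bool.false_eq_true, if_false]
        rw [hrw2]
        conv_lhs => rw [hrw1]
        rw [ih (pre ++ [x]) (acc ++ [x])]
        rw [pvCollapse, if_neg hb, List.append_assoc]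
        rfl

theorem pv_removeSpacesA_eq (line : List Char) :
    pvRemoveSpacesA line = pvCollapse (PySem.Chars.lstrip line) := by
  have h := pv_loopA (PySem.Chars.lstrip line) [] []
  simpa [pvRemoveSpacesA] using h

-- 6. B's pairwise filter plus the last character is pvCollapse ----------------

theorem pv_kept_eq (l : List Char) :
    pvKept l ++ PySem.List.slice l (some (-1)) none = pvCollapse l := by
  rw [PySem.List.slice_from_neg_one]
  induction l using pvCollapse.induct with
  | case1 => rfl
  | case2 x => simp [pvKept, pvCollapse, PySem.List.slice_from_one]
  | case3 x y r hc ih =>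
    obtain ⟨hx, hy⟩ := hc
    subst hx
    have hcond : ((' ', y).1 != ' ' || !((' ', y).2 == ' ' || (' ', y).2 == '\n')) = false := by
      rcases hy with hy | hy <;> subst hy <;> decide
    rw [pvCollapse, if_pos ⟨rfl, hy⟩, ← ih]
    simp only [pvKept, PySem.List.slice_from_one, List.tail_cons, List.zip_cons_cons,
      List.filter_cons, hcond, Bool.false_eq_true, if_false]
    simp [List.length_cons]
  | case4 x y r hc ih =>
    have hcond : ((x, y).1 != ' ' || !((x, y).2 == ' ' || (x, y).2 == '\n')) = true := by
      by_cases hx : x = ' '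
      · subst hx
        have h2 : ¬ (y = ' ' ∨ y = '\n') := fun h => hc ⟨rfl, h⟩
        simp only [not_or] at h2
        simp [h2.1, h2.2]
      · simp [hx]
    rw [pvCollapse, if_neg hc, ← ih]
    simp only [pvKept, PySem.List.slice_from_one, List.tail_cons, List.zip_cons_cons,
      List.filter_cons, hcond, if_true, List.map_cons, List.cons_append]
    simp [List.length_cons]

-- 7. per-line equality --------------------------------------------------------

theorem pv_line_eq (l0 : List Char) :
    (PySem.Chars.splitOn
      (pvRemoveSpacesA (PySem.Chars.strip
        (pvPunct.foldl (fun l c => PySem.Chars.replace l [c] [' ', c, ' '])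
          (PySem.Chars.replace (PySem.Chars.strip l0) ['\t'] [' '])))) [' '])
    = PySem.Chars.splitOn
        (pvKept (PySem.Chars.strip (l0.flatMap pvPad))
          ++ PySem.List.slice (PySem.Chars.strip (l0.flatMap pvPad)) (some (-1)) none) [' '] := by
  have h2 : PySem.Chars.replace (PySem.Chars.strip l0) ['\t'] [' ']
      = (PySem.Chars.strip l0).flatMap pvTabf := by
    rw [pv_replace_single]; rfl
  have h3 : pvPunct.foldl (fun l c => PySem.Chars.replace l [c] [' ', c, ' '])
        ((PySem.Chars.strip l0).flatMap pvTabf)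
      = (PySem.Chars.strip l0).flatMap pvPad := by
    rw [pv_foldl_replace pvPunct (by decide) (by decide), List.flatMap_assoc,
      funext pv_pad_eq]
  rw [h2, h3, pv_strip_pad_strip, pv_removeSpacesA_eq, pv_lstrip_strip, pv_kept_eq]

-- 8. whole-list equality ------------------------------------------------------

theorem pv_fold_lines (lines : List String) :
    ∀ (acc : List (List String)),
      lines.foldl (fun output line =>
        if PySem.Str.strip line ≠ "" then
          output ++ [(PySem.Chars.splitOn
            (pvRemoveSpacesA (PySem.Chars.strip
              (pvPunct.foldl (fun l c => PySem.Chars.replace l [c] [' ', c, ' '])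
                (PySem.Chars.replace (PySem.Chars.strip line.toList) ['\t'] [' '])))) [' ']).map String.ofList]
        else output) acc
      = lines.foldl (fun output line =>
        if PySem.Str.strip line ≠ "" then
          output ++ [(PySem.Chars.splitOn
            (pvKept (PySem.Chars.strip (line.toList.flatMap pvPad))
              ++ PySem.List.slice (PySem.Chars.strip (line.toList.flatMap pvPad)) (some (-1)) none) [' ']).map String.ofList]
        else output) acc := by
  induction lines with
  | nil => intro acc; rw [List.foldl_nil, List.foldl_nil]
  | cons line rest ih =>
    intro acc
    rw [List.foldl_cons, List.foldl_cons, pv_line_eq line.toList]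
    exact ih _

-- ===== VERDICT (by name: the statement is the Claim_ definition above) =====
theorem simple_tokenize_list_spec : Claim_equal_simple_tokenize_list := by
  intro lines _
  unfold Spec_simple_tokenize_list simple_tokenize_list simple_tokenize_list_alt
  exact pv_fold_lines lines []
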